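-- pv_equiv track=rewrite | github.com/Quaqqer/aoc | 2022/day17.py | touches_dropped
-- ===== SOURCE A (Python) =====
-- def touches_dropped(dropped, rock, rockx, rocky) -> bool:
--     h = len(rock)
--     for y, row in enumerate(rock):
--         for x, c in enumerate(row):
--             if c != " ":
--                 px, py = rockx + x, rocky - h + y
--                 if (px, py) in dropped:
--                     return True
--     return False
-- ===== SOURCE B (Python) =====
-- def touches_dropped(dropped, rock, rockx, rocky) -> bool:
--     h = len(rock)
--     cells = {(rockx + x, rocky - h + y)
--              for y, row in enumerate(rock)
--              for x, c in enumerate(row)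
--              if c != " "}
--     return any(p in cells for p in dropped)
-- ===== Notes on version B (the rewrite author's own statement) =====
-- stated objective: alternative
-- what changed: B inverts the traversal: it precomputes the set of absolute coordinates of all non-blank rock cells once and then scans the dropped list testing membership in that set, instead of A's nested scan over the rock grid with a linear membership probe into dropped and an early return.
import Mathlib
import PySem

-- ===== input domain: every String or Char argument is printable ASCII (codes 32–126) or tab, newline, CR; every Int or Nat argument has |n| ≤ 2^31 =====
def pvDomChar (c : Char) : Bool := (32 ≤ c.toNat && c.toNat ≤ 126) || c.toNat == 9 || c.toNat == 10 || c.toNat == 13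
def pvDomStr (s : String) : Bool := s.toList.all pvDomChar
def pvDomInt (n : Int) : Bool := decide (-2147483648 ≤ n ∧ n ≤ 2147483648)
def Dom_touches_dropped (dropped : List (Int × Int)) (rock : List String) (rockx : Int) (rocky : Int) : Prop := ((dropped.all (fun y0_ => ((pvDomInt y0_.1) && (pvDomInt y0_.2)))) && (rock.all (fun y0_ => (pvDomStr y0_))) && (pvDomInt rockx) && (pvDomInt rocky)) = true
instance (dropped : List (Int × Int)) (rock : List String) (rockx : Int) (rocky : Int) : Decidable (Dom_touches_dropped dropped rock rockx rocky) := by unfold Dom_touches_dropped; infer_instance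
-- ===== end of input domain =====

-- B inverts the traversal: it precomputes the set of absolute rock-cell coordinates once and
-- scans `dropped` against it, instead of A's nested grid scan probing `dropped` with early return.

-- ===== PORT A =====
-- inner 'for x, c in enumerate(row)' with the early 'return True'
def tdRowA (dropped : List (Int × Int)) (rockx py : Int) : List (Int × Char) → Bool
  | [] => false
  | (x, c) :: rest =>
    if c ≠ ' ' then
      if dropped.contains (rockx + x, py) then true
      else tdRowA dropped rockx py rest
    else tdRowA dropped rockx py rest

-- outer 'for y, row in enumerate(rock)'
def tdOuterA (dropped : List (Int × Int)) (rockx rocky h : Int) : List (Int × String) → Bool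
  | [] => false
  | (y, row) :: rest =>
    if tdRowA dropped rockx (rocky - h + y) (PySem.List.enumerate row.toList) then true
    else tdOuterA dropped rockx rocky h rest

def touches_dropped (dropped : List (Int × Int)) (rock : List String) (rockx : Int) (rocky : Int) : Bool :=
  let h : Int := rock.length
  tdOuterA dropped rockx rocky h (PySem.List.enumerate rock)

-- ===== PORT B =====
def touches_dropped_alt (dropped : List (Int × Int)) (rock : List String) (rockx : Int) (rocky : Int) : Bool :=
  let h : Int := rock.length
  let cells : PySem.Set (Int × Int) := PySem.Set.ofList
    ((PySem.List.enumerate rock).flatMap (fun yr =>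
      (PySem.List.enumerate yr.2.toList).filterMap (fun xc =>
        if xc.2 ≠ ' ' then some (rockx + xc.1, rocky - h + yr.1) else none)))
  dropped.any (fun p => PySem.Set.contains cells p)

-- ===== PRECONDITION & SPEC =====
def Spec_touches_dropped (dropped : List (Int × Int)) (rock : List String) (rockx : Int) (rocky : Int) (out : Bool) : Prop := out = touches_dropped_alt dropped rock rockx rocky
instance (dropped : List (Int × Int)) (rock : List String) (rockx : Int) (rocky : Int) (out : Bool) : Decidable (Spec_touches_dropped dropped rock rockx rocky out) := by unfold Spec_touches_dropped; infer_instance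

-- ===== CLAIM (what is proved, stated in full; the proofs are below) =====
def Claim_equal_touches_dropped : Prop := ∀ (dropped : List (Int × Int)) (rock : List String) (rockx : Int) (rocky : Int), Dom_touches_dropped dropped rock rockx rocky → Spec_touches_dropped dropped rock rockx rocky (touches_dropped dropped rock rockx rocky)

-- ===== LEMMAS AND PROOFS =====

-- A's inner loop is an 'any' over the enumerated row
theorem tdRowA_eq_any (dropped : List (Int × Int)) (rockx py : Int) (l : List (Int × Char)) :
    tdRowA dropped rockx py l
      = l.any (fun xc => xc.2 ≠ ' ' && dropped.contains (rockx + xc.1, py)) := by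
  induction l with
  | nil => rfl
  | cons hd tl ih =>
    obtain ⟨x, c⟩ := hd
    simp only [tdRowA, List.any_cons, ih]
    by_cases hc : c = ' '
    · simp [hc]
    · by_cases hm : dropped.contains (rockx + x, py) <;> simp [hc, hm]

-- A's outer loop is an 'any' over the enumerated rows
theorem tdOuterA_eq_any (dropped : List (Int × Int)) (rockx rocky h : Int)
    (l : List (Int × String)) :
    tdOuterA dropped rockx rocky h l
      = l.any (fun yr => tdRowA dropped rockx (rocky - h + yr.1) (PySem.List.enumerate yr.2.toList)) := by
  induction l with
  | nil => rfl
  | cons hd tl ih =>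
    obtain ⟨y, row⟩ := hd
    simp only [tdOuterA, List.any_cons, ih]
    by_cases hr : tdRowA dropped rockx (rocky - h + y) (PySem.List.enumerate row.toList) <;>
      simp [hr]

-- ===== VERDICT (by name: the statement is the Claim_ definition above) =====
theorem touches_dropped_spec : Claim_equal_touches_dropped := by
  intro dropped rock rockx rocky _
  unfold Spec_touches_dropped touches_dropped touches_dropped_alt
  rw [Bool.eq_iff_iff]
  simp only [tdOuterA_eq_any, tdRowA_eq_any, List.any_eq_true, List.contains_eq_mem,
    PySem.Set.contains, PySem.Set.mem_ofList, List.mem_flatMap, List.mem_filterMap,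
    decide_eq_true_eq, Bool.and_eq_true, ne_eq, decide_not, Bool.not_eq_eq_eq_not,
    Bool.not_true, decide_eq_false_iff_not]
  constructor
  · rintro ⟨yr, hyr, xc, hxc, hc, hmem⟩
    exact ⟨(rockx + xc.1, rocky - ↑rock.length + yr.1), hmem, yr, hyr, xc, hxc, by simp [hc]⟩
  · rintro ⟨p, hp, yr, hyr, xc, hxc, hcell⟩
    refine ⟨yr, hyr, xc, hxc, ?_, ?_⟩
    · intro h; simp [h] at hcell
    · have : p = (rockx + xc.1, rocky - ↑rock.length + yr.1) := by
        by_cases h : xc.2 = ' '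
        · simp [h] at hcell
        · simpa [h] using hcell.symm
      rwa [this] at hp
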